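-- pv_equiv track=rewrite | github.com/linhdvu14/cp-sols | sols/CodeForces/1861_edu/C_Queries_for_the_Array.py | solve
-- ===== SOURCE A (Python) =====
-- def solve(S):
--     st = []
--     zero = 0
--     for c in S:
--         if c == '+':
--             st.append(-1)
--         elif c == '-':
--             v = st.pop()
--             if v == 0: zero -= 1
--             if v == 1 and st: st[-1] = 1
--         elif c == '0':
--             if len(st) < 2 or st[-1] == 1: return 'NO'
--             if st[-1] == -1:
--                 st[-1] = 0
--                 zero += 1
--         else:
--             if zero: return 'NO'
--             if st: st[-1] = 1
--     return 'YES'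
-- ===== SOURCE B (Python) =====
-- def solve(S):
--     # O(1) state instead of a mark stack: n = current array size,
--     # maxs = largest size declared sorted, minu = smallest size marked unsorted (None if none)
--     n = 0
--     maxs = 0
--     minu = None
--     for c in S:
--         if c == '+':
--             n += 1
--         elif c == '-':
--             if minu == n:
--                 minu = None
--             if maxs == n:
--                 maxs = n - 1
--             n -= 1
--         elif c == '0':
--             if n < 2 or n == maxs:
--                 return 'NO'
--             minu = n if minu is None else min(minu, n)
--         else:
--             if minu is not None:
--                 return 'NO'
--             if n >= 1:
--                 maxs = n
--     return 'YES'
-- ===== Notes on version B (the rewrite author's own statement) =====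
-- stated objective: alternative
-- what changed: Replaces A's O(n) stack of {-1,0,1} marks (plus a zero-counter) by three scalars kept in O(1) space: the current array size n, the largest size declared sorted (maxs) and the smallest size still marked unsorted (minu).
-- outside the precondition, e.g. on solve('0-'): A returns 'NO', B returns 'NO'; on solve('+-0-'): A returns 'NO', B returns 'NO'; on solve('-'): A raises IndexError, B returns 'YES'
import Mathlib
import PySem

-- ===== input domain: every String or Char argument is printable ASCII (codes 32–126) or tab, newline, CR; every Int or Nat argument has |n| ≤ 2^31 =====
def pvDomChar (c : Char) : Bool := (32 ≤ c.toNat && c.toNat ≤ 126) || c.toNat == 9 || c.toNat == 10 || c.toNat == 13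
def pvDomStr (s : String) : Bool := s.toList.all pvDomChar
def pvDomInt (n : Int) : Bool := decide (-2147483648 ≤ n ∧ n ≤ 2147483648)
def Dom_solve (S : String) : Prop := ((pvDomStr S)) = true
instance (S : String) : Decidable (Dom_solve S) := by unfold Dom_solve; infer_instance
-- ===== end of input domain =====

-- B replaces A's O(n) stack of {-1,0,1} marks by three scalars (size, largest sorted size, smallest unsorted size): same answers, O(1) extra space.

-- ===== PORT A =====
-- stack kept head-first: Python st.append / st.pop / st[-1] are cons / head / head here
def solveAux : List Char → List Int → Int → String
  | [], _, _ => "YES"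
  | c :: cs, st, zero =>
    if c = '+' then solveAux cs ((-1) :: st) zero
    else if c = '-' then
      match st with
      | [] => "YES"   -- Python raises IndexError here (pop from empty list); excluded by Pre_solve
      | v :: rest =>
        let zero' := if v = 0 then zero - 1 else zero
        let st' := if v = 1 then (match rest with | [] => ([] : List Int) | _ :: r => (1 : Int) :: r) else rest
        solveAux cs st' zero'
    else if c = '0' then
      if st.length < 2 ∨ st.head? = some 1 then "NO"
      else if st.head? = some (-1) then solveAux cs ((0 : Int) :: st.tail) (zero + 1)
      else solveAux cs st zero
    else
      if zero ≠ 0 then "NO"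
      else match st with
        | [] => solveAux cs st zero
        | _ :: r => solveAux cs ((1 : Int) :: r) zero

def solve (S : String) : String := solveAux S.toList [] 0

-- ===== PORT B =====
def solveAltAux : List Char → Int → Int → Option Int → String
  | [], _, _, _ => "YES"
  | c :: cs, n, maxs, minu =>
    if c = '+' then solveAltAux cs (n + 1) maxs minu
    else if c = '-' then
      solveAltAux cs (n - 1) (if maxs = n then n - 1 else maxs) (if minu = some n then none else minu)
    else if c = '0' then
      if n < 2 ∨ n = maxs then "NO"
      else solveAltAux cs n maxs (some (match minu with | none => n | some m => min m n))
    else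
      if minu.isSome then "NO"
      else solveAltAux cs n (if 1 ≤ n then n else maxs) minu

def solve_alt (S : String) : String := solveAltAux S.toList 0 0 none

-- ===== PRECONDITION & SPEC =====
-- Pre_ excludes strings having a prefix with more '-' than '+': on such strings A's st.pop()
-- raises IndexError (except on a few where an earlier query already returned 'NO'); B has no
-- stack and returns normally everywhere.
def Pre_solve (S : String) : Prop := ∀ p ∈ S.toList.inits, p.count '-' ≤ p.count '+'
instance (S : String) : Decidable (Pre_solve S) := by unfold Pre_solve; infer_instance
def pvWitness_solve : String := "++0-1-"
def Spec_solve (S : String) (out : String) : Prop := out = solve_alt S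
instance (S : String) (out : String) : Decidable (Spec_solve S out) := by unfold Spec_solve; infer_instance

-- ===== CLAIM (what is proved, stated in full; the proofs are below) =====
def Claim_equal_solve : Prop := ∀ (S : String), Dom_solve S → Pre_solve S → Spec_solve S (solve S)

-- ===== LEMMAS AND PROOFS =====

-- position (1-based size from the bottom) of the topmost 1-mark, 0 if none
def topOne : List Int → Int
  | [] => 0
  | a :: r => if a = 1 then (r.length : Int) + 1 else topOne r

-- position of the lowest 0-mark, none if no 0-mark
def lowZero : List Int → Option Int
  | [] => none
  | a :: r => match lowZero r with
    | some m => some m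
    | none => if a = 0 then some ((r.length : Int) + 1) else none

-- every 0-mark lies above (closer to the top than) every 1-mark
def Zbo : List Int → Prop
  | [] => True
  | a :: r => (a = 1 → (0 : Int) ∉ r) ∧ Zbo r

def StInv (st : List Int) (zero n maxs : Int) (minu : Option Int) : Prop :=
  n = (st.length : Int) ∧ zero = (st.count 0 : Int) ∧
  (∀ x ∈ st, x = -1 ∨ x = 0 ∨ x = 1) ∧
  maxs = topOne st ∧ minu = lowZero st ∧ Zbo st

-- no '-' underflows when starting from a stack of k elements
def NoUF : List Char → Nat → Prop
  | [], _ => True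
  | c :: cs, k =>
    if c = '+' then NoUF cs (k + 1)
    else if c = '-' then k ≠ 0 ∧ NoUF cs (k - 1)
    else NoUF cs k

lemma topOne_le (st : List Int) : topOne st ≤ (st.length : Int) := by
  induction st with
  | nil => simp [topOne]
  | cons a r ih =>
    simp only [topOne, List.length_cons]
    split_ifs <;> push_cast <;> omega

lemma lowZero_none_iff (st : List Int) : lowZero st = none ↔ (0 : Int) ∉ st := by
  induction st with
  | nil => simp [lowZero]
  | cons a r ih =>
    simp only [lowZero, List.mem_cons]
    cases h : lowZero r with
    | some m => simp [h] at ih ⊢; exact fun _ => ih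
    | none =>
      simp [h] at ih ⊢
      constructor
      · intro hne; exact ⟨fun h0 => hne h0.symm, ih⟩
      · intro ⟨h1, _⟩ h2; exact h1 h2.symm
  
lemma lowZero_le (st : List Int) (m : Int) (h : lowZero st = some m) :
    1 ≤ m ∧ m ≤ (st.length : Int) := by
  induction st generalizing m with
  | nil => simp [lowZero] at h
  | cons a r ih =>
    simp only [lowZero] at h
    cases h' : lowZero r with
    | some mm =>
      rw [h'] at h
      have hmm : mm = m := by simpa using h
      have := ih mm h'
      simp only [List.length_cons]; push_cast; omega
    | none =>
      rw [h'] at h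
      split_ifs at h with ha
      · have : (r.length : Int) + 1 = m := by simpa using h
        simp only [List.length_cons]; push_cast; omega

-- helper lemmas for Pre_ → NoUF
lemma mem_inits_cons (c : Char) (cs : List Char) (p : List Char) (h : p ∈ cs.inits) :
    (c :: p) ∈ (c :: cs).inits := by
  rw [List.inits_cons]
  exact List.mem_cons_of_mem _ (List.mem_map.2 ⟨p, h, rfl⟩)

lemma pre_noUF : ∀ (cs : List Char) (k : Nat),
    (∀ p ∈ cs.inits, p.count '-' ≤ k + p.count '+') → NoUF cs k := by
  intro cs
  induction cs with
  | nil => intro k _; trivial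
  | cons c cs ih =>
    intro k h
    by_cases hplus : c = '+'
    · simp only [NoUF, hplus, reduceIte]
      apply ih
      intro p hp
      have := h ('+' :: p) (hplus ▸ mem_inits_cons c cs p hp)
      simp [List.count_cons] at this
      omega
    · by_cases hminus : c = '-'
      · simp only [NoUF, hplus, hminus, reduceIte]
        have hk : 1 ≤ k := by
          have h1 : [c] ∈ (c :: cs).inits := mem_inits_cons c cs [] (by simp)
          have := h [c] h1
          simp [hminus] at this
          omega
        refine ⟨by omega, ?_⟩
        apply ih
        intro p hp
        have := h ('-' :: p) (hminus ▸ mem_inits_cons c cs p hp)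
        simp [List.count_cons] at this
        omega
      · simp only [NoUF, hplus, hminus, reduceIte]
        apply ih
        intro p hp
        have := h (c :: p) (mem_inits_cons c cs p hp)
        simp [List.count_cons, hplus, hminus] at this
        omega

lemma topOne_cons_ne (a : Int) (r : List Int) (ha : a ≠ 1) : topOne (a :: r) = topOne r := by
  simp [topOne, ha]

lemma count_zero_not_mem (st : List Int) (h : st.count 0 = 0) : (0 : Int) ∉ st :=
  fun hm => by simp [List.count_eq_zero] at h; exact h hm

theorem main_lemma : ∀ (cs : List Char) (st : List Int) (zero n maxs : Int) (minu : Option Int),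
    NoUF cs st.length → StInv st zero n maxs minu →
    solveAux cs st zero = solveAltAux cs n maxs minu := by
  intro cs
  induction cs with
  | nil => intro st zero n maxs minu _ _; rfl
  | cons c cs ih =>
    intro st zero n maxs minu hUF hI
    obtain ⟨hn, hz, helem, hmaxs, hminu, hzbo⟩ := hI
    by_cases hplus : c = '+'
    · -- '+' : push -1
      simp only [solveAux, solveAltAux, hplus, Char.reduceEq, reduceIte]
      simp only [NoUF, hplus, Char.reduceEq, reduceIte] at hUF
      apply ih ((-1 : Int) :: st) zero (n + 1) maxs minu (by simpa using hUF)
      refine ⟨by simp [hn], by simp [hz], ?_, ?_, ?_, ⟨by norm_num, hzbo⟩⟩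
      · intro x hx
        rcases List.mem_cons.1 hx with h | h
        · left; exact h
        · exact helem x h
      · simp only [topOne]; norm_num [hmaxs]
      · simp only [lowZero]
        cases h : lowZero st with
        | some m => simp [hminu, h]
        | none => simp [hminu, h]
    · by_cases hminus : c = '-'
      · -- '-' : pop
        simp only [NoUF, hplus, hminus, Char.reduceEq, reduceIte] at hUF
        cases st with
        | nil => simp at hUF
        | cons v rest =>
          simp only [solveAux, solveAltAux, hplus, hminus, Char.reduceEq, reduceIte]
          have hUF' : NoUF cs rest.length := by
            have := hUF.2; simpa using this
          have hnlen : n = (rest.length : Int) + 1 := by simp [hn]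
          rcases helem v (by simp) with hv | hv | hv
          · -- v = -1 : plain pop
            subst hv
            norm_num only
            have hmax' : maxs = topOne rest := by rw [hmaxs, topOne_cons_ne]; norm_num
            have hmaxlt : ¬ maxs = n := by
              have := topOne_le rest; rw [hmax']; omega
            have hlow : lowZero ((-1 : Int) :: rest) = lowZero rest := by
              simp only [lowZero]
              cases h : lowZero rest with
              | some m => rfl
              | none => norm_num
            have hminu' : minu = lowZero rest := hminu.trans hlow
            have hne : ¬ minu = some n := by
              rw [hminu']
              cases h : lowZero rest with
              | none => simp
              | some m =>
                have := lowZero_le rest m h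
                simp; omega
            rw [if_neg hmaxlt, if_neg hne]
            apply ih rest zero (n - 1) maxs minu hUF'
            exact ⟨by omega, by simpa using hz, fun x hx => helem x (by simp [hx]),
              hmax', hminu', hzbo.2⟩
          · -- v = 0 : pop a 0-mark
            subst hv
            norm_num only
            have hmax' : maxs = topOne rest := by rw [hmaxs, topOne_cons_ne]; norm_num
            have hmaxlt : ¬ maxs = n := by
              have := topOne_le rest; rw [hmax']; omega
            have hz' : zero - 1 = (rest.count 0 : Int) := by
              simp [List.count_cons] at hz; omega
            rw [if_neg hmaxlt]
            cases h : lowZero rest with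
            | some m =>
              have hmle := lowZero_le rest m h
              have hminu' : minu = some m := by
                rw [hminu]; simp only [lowZero, h]
              have hne : ¬ minu = some n := by rw [hminu']; simp; omega
              rw [if_neg hne]
              apply ih rest (zero - 1) (n - 1) maxs minu hUF'
              exact ⟨by omega, hz', fun x hx => helem x (by simp [hx]), hmax',
                hminu'.trans h.symm, hzbo.2⟩
            | none =>
              have hminu' : minu = some n := by
                rw [hminu]; simp only [lowZero, h]
                simp [hnlen]
              rw [if_pos hminu']
              apply ih rest (zero - 1) (n - 1) maxs none hUF'
              exact ⟨by omega, hz', fun x hx => helem x (by simp [hx]), hmax', h.symm, hzbo.2⟩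
          · -- v = 1 : pop a 1-mark, propagate
            subst hv
            norm_num only
            have h0rest : (0 : Int) ∉ rest := hzbo.1 rfl
            have hmax' : maxs = n := by
              rw [hmaxs]; simp [topOne, hnlen]
            rw [if_pos hmax']
            have hlowrest : lowZero rest = none := (lowZero_none_iff rest).2 h0rest
            have hminu' : minu = none := by
              rw [hminu]; simp only [lowZero, hlowrest]; norm_num
            have hne : ¬ minu = some n := by rw [hminu']; simp
            rw [if_neg hne, hminu']
            have hzrest : zero = (rest.count 0 : Int) := by
              simp [List.count_cons] at hz; omega
            cases rest with
            | nil =>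
              have hn1 : n = 1 := by simpa using hnlen
              apply ih [] zero (n - 1) (n - 1) none (by simpa using hUF')
              refine ⟨by simp [hn1], by simpa using hzrest, by simp, ?_, by simp [lowZero], trivial⟩
              simp [topOne, hn1]
            | cons t r =>
              have h0r : (0 : Int) ∉ r := fun hm => h0rest (by simp [hm])
              have ht0 : t ≠ 0 := fun hm => h0rest (by simp [hm])
              apply ih ((1 : Int) :: r) zero (n - 1) (n - 1) none (by simpa using hUF')
              refine ⟨?_, ?_, ?_, ?_, ?_, ?_⟩
              · simp [hnlen]
              · rw [hzrest]; simp [List.count_cons, ht0]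
              · intro x hx
                rcases List.mem_cons.1 hx with h | h
                · right; right; exact h
                · exact helem x (by simp [h])
              · simp [topOne, hnlen]
              · simp only [lowZero]
                have : lowZero r = none := (lowZero_none_iff r).2 h0r
                simp [this]
              · exact ⟨fun _ => h0r, hzbo.2.2⟩
      · by_cases hzeroC : c = '0'
        · -- '0' query
          simp only [NoUF, hplus, hminus, hzeroC, Char.reduceEq, reduceIte] at hUF
          simp only [solveAux, solveAltAux, hplus, hminus, hzeroC, Char.reduceEq, reduceIte]
          cases st with
          | nil =>
            have h1 : (([] : List Int).length < 2 ∨ ([] : List Int).head? = some 1) :=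
              Or.inl (by simp)
            have h2 : (n < 2 ∨ n = maxs) := Or.inl (by simp at hn; omega)
            rw [if_pos h1, if_pos h2]
          | cons a r =>
            have hnlen : n = (r.length : Int) + 1 := by simp [hn]
            by_cases ha1 : a = 1
            · -- top already sorted: both NO
              subst ha1
              have hmax' : maxs = n := by rw [hmaxs]; simp [topOne, hnlen]
              have h1 : (((1 : Int) :: r).length < 2 ∨ ((1 : Int) :: r).head? = some 1) :=
                Or.inr (by simp)
              have h2 : (n < 2 ∨ n = maxs) := Or.inr hmax'.symm
              rw [if_pos h1, if_pos h2]
            · have hmax' : maxs = topOne r := by rw [hmaxs, topOne_cons_ne _ _ ha1]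
              have hmaxlt : maxs ≠ n := by have := topOne_le r; rw [hmax']; omega
              by_cases hlen : (a :: r).length < 2
              · have h2 : (n < 2 ∨ n = maxs) := Or.inl (by
                  have := hlen; simp only [List.length_cons] at this; omega)
                rw [if_pos (Or.inl hlen), if_pos h2]
              · have hn2 : ¬ n < 2 := by
                  simp only [List.length_cons, not_lt] at hlen; omega
                have h1 : ¬ ((a :: r).length < 2 ∨ (a :: r).head? = some 1) := by
                  rintro (h | h)
                  · simp only [List.length_cons] at h; omega
                  · simp at h; exact ha1 h
                have h2 : ¬ (n < 2 ∨ n = maxs) := by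
                  rintro (h | h)
                  · exact hn2 h
                  · exact hmaxlt h.symm
                rw [if_neg h1, if_neg h2]
                rcases helem a (by simp) with ha | ha | ha
                · -- top = -1 : mark it 0
                  subst ha
                  have hh : (((-1 : Int) :: r).head? = some (-1)) := by simp
                  rw [if_pos hh]
                  apply ih ((0 : Int) :: r) (zero + 1) n maxs _ (by simpa using hUF)
                  refine ⟨by simpa using hn, ?_, ?_, ?_, ?_, ?_⟩
                  · simp [List.count_cons] at hz ⊢; omega
                  · intro x hx
                    rcases List.mem_cons.1 hx with h | h
                    · right; left; exact h
                    · exact helem x (by simp [h])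
                  · rw [hmax', topOne_cons_ne]; norm_num
                  · simp only [lowZero]
                    cases h : lowZero r with
                    | some m =>
                      have hmle := lowZero_le r m h
                      have hmn : minu = some m := by
                        rw [hminu]; simp only [lowZero, h]
                      rw [hmn]
                      simp [min_eq_left (by omega : m ≤ n)]
                    | none =>
                      have hmn : minu = none := by
                        rw [hminu]; simp only [lowZero, h]; norm_num
                      rw [hmn]
                      simp [hnlen]
                  · exact ⟨by norm_num, hzbo.2⟩
                · -- top = 0 : already marked, state unchanged
                  subst ha
                  have hh : ¬ (((0 : Int) :: r).head? = some (-1)) := by simp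
                  rw [if_neg hh]
                  apply ih ((0 : Int) :: r) zero n maxs _ (by simpa using hUF)
                  refine ⟨hn, hz, helem, hmaxs, ?_, hzbo⟩
                  simp only [lowZero] at hminu ⊢
                  cases h : lowZero r with
                  | some m =>
                    have hmle := lowZero_le r m h
                    rw [h] at hminu
                    rw [hminu]
                    simp [min_eq_left (by omega : m ≤ n)]
                  | none =>
                    rw [h] at hminu
                    simp only [reduceIte] at hminu
                    rw [hminu]
                    simp [hnlen]
                · exact absurd ha ha1
        · -- other character : '1' query
          simp only [NoUF, hplus, hminus, hzeroC, Char.reduceEq, reduceIte] at hUF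
          simp only [solveAux, solveAltAux, hplus, hminus, hzeroC, Char.reduceEq, reduceIte]
          by_cases hzero : zero ≠ 0
          · have hmem : (0 : Int) ∈ st := by
              by_contra hm
              have : st.count 0 = 0 := List.count_eq_zero.2 hm
              omega
            have hsome : minu.isSome := by
              rw [hminu]
              cases h : lowZero st with
              | none => exact absurd ((lowZero_none_iff st).1 h) (by simpa using hmem)
              | some m => simp
            rw [if_pos hzero, if_pos hsome]
          · push_neg at hzero
            have h0st : (0 : Int) ∉ st := by
              apply count_zero_not_mem
              omega
            have hminu' : minu = none := hminu.trans ((lowZero_none_iff st).2 h0st)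
            have hns : ¬ minu.isSome = true := by simp [hminu']
            rw [if_neg (by simpa using hzero), if_neg hns]
            cases st with
            | nil =>
              have hn0 : ¬ (1 : Int) ≤ n := by simp at hn; omega
              rw [if_neg hn0]
              exact ih [] zero n maxs minu (by simpa using hUF) ⟨hn, hz, helem, hmaxs, hminu, hzbo⟩
            | cons h r =>
              have hnlen : n = (r.length : Int) + 1 := by simp [hn]
              have h0r : (0 : Int) ∉ r := fun hm => h0st (by simp [hm])
              rw [if_pos (by omega : (1 : Int) ≤ n)]
              apply ih ((1 : Int) :: r) zero n n minu (by simpa using hUF)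
              refine ⟨by simpa using hn, ?_, ?_, ?_, ?_, ⟨fun _ => h0r, hzbo.2⟩⟩
              · have hh0 : h ≠ 0 := fun hm => h0st (by simp [hm])
                simp [List.count_cons, hh0] at hz ⊢
                omega
              · intro x hx
                rcases List.mem_cons.1 hx with hx | hx
                · right; right; exact hx
                · exact helem x (by simp [hx])
              · simp [topOne, hnlen]
              · rw [hminu']
                simp only [lowZero, (lowZero_none_iff r).2 h0r]
                norm_num

-- ===== VERDICT (by name: the statement is the Claim_ definition above) =====
theorem solve_spec : Claim_equal_solve := by
  intro S _ hPre
  unfold Spec_solve solve solve_alt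
  apply main_lemma _ _ _ _ _ _ _ ?inv
  case inv => exact ⟨rfl, rfl, by simp, rfl, rfl, trivial⟩
  · apply pre_noUF
    intro p hp
    have := hPre p hp
    omega
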